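-- pv_equiv track=rewrite | github.com/MrBrantCode/unitest_baseline | mut_generate/mist_train_cf/cf_87532/solution.py | find_subarray
-- ===== SOURCE A (Python) =====
-- def find_subarray(arr, k, m):
--     n = len(arr)
--     max_sum = float('-inf')
--     subarray = []
--     found_subarray = False
--     has_negative_and_positive = False
--
--     for i in range(n - m + 1):
--         for j in range(i, n):
--             current_sum = sum(arr[i:j + 1])
--             has_negative_and_positive = any(x < 0 for x in arr[i:j + 1]) and any(x > 0 for x in arr[i:j + 1])
--             if (j - i + 1) >= m and current_sum < k and current_sum > max_sum and has_negative_and_positive: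
--                 max_sum = current_sum
--                 subarray = arr[i:j + 1]
--                 found_subarray = True
--
--     if not found_subarray:
--         return []
--
--     return subarray
-- ===== SOURCE B (Python) =====
-- def _scan(xs):
--     # prefix accumulation: out[t] = sum of xs[:t]
--     out = [0]
--     acc = 0
--     for v in xs:
--         acc += v
--         out.append(acc)
--     return out
--
--
-- def find_subarray(arr, k, m):
--     n = len(arr)
--     pre = _scan(arr)
--     neg = _scan([1 if x < 0 else 0 for x in arr])
--     pos = _scan([1 if x > 0 else 0 for x in arr])
--     cands = [(pre[j + 1] - pre[i], i, j)
--              for i in range(n - m + 1)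
--              for j in range(max(i, i + m - 1), n)
--              if pre[j + 1] - pre[i] < k
--              and neg[i] < neg[j + 1]
--              and pos[i] < pos[j + 1]]
--     if not cands:
--         return []
--     _, bi, bj = max(cands, key=lambda t: t[0])
--     return arr[bi:bj + 1]
-- ===== Notes on version B (the rewrite author's own statement) =====
-- stated objective: faster
-- what changed: B precomputes three prefix arrays (running sum, negative count, positive count) in one staged pass, builds the list of all qualifying windows of length >= m as (sum, i, j) candidates via O(1) prefix lookups, and picks the winner with a single max() over that list, instead of A's re-summation and sign re-scan of every slice inside nested loops.
import Mathlib
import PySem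

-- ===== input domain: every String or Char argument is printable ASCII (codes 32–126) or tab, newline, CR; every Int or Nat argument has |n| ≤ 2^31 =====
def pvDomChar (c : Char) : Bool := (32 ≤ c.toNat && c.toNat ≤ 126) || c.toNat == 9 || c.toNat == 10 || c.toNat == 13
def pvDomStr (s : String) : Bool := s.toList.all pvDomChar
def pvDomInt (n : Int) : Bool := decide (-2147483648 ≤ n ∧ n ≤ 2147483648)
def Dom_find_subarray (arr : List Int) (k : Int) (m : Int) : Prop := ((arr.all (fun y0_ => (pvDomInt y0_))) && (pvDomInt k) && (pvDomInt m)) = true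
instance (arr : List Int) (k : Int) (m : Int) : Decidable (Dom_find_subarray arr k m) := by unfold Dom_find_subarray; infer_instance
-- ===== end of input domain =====

-- B replaces A's per-window re-summation and sign re-scan (O(n^3)) by three prefix
-- arrays built once, a candidate-list comprehension over windows of length ≥ m,
-- and a single max() over the candidates (O(n^2)); same return value everywhere.

-- ===== PORT A =====
-- max_sum = float('-inf') is modelled as `none`, which compares below every Int.
def bestLtA (o : Option Int) (s : Int) : Bool :=
  match o with | none => true | some mx => decide (mx < s)

def stepA (arr : List Int) (k m i : Int) (st : Option Int × List Int × Bool) (j : Int) :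
    Option Int × List Int × Bool :=
  let seg := PySem.List.slice arr (some i) (some (j + 1))
  let currentSum := seg.sum
  let hnp := (seg.any (fun x => decide (x < 0))) && (seg.any (fun x => decide (0 < x)))
  if (decide (m ≤ j - i + 1) && decide (currentSum < k) &&
      bestLtA st.1 currentSum && hnp) = true
  then (some currentSum, seg, true)
  else st

def find_subarray (arr : List Int) (k : Int) (m : Int) : List Int :=
  let n : Int := arr.length
  let st := (PySem.List.pyRange 0 (n - m + 1) 1).foldl
    (fun st i => (PySem.List.pyRange i n 1).foldl (stepA arr k m i) st)
    ((none : Option Int), ([] : List Int), false)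
  if st.2.2 = false then [] else st.2.1

-- ===== PORT B =====
-- _scan: prefix accumulation, out[t] = sum of xs[:t]
def pyScan (xs : List Int) : List Int :=
  (xs.foldl (fun t v => (t.1 + v, t.2 ++ [t.1 + v])) ((0 : Int), [(0 : Int)])).2

-- one clause of the candidate comprehension, for fixed i
def candB (pre neg pos : List Int) (k i j : Int) : Option (Int × Int × Int) :=
  if PySem.List.pyGetD pre (j + 1) 0 - PySem.List.pyGetD pre i 0 < k ∧
     PySem.List.pyGetD neg i 0 < PySem.List.pyGetD neg (j + 1) 0 ∧
     PySem.List.pyGetD pos i 0 < PySem.List.pyGetD pos (j + 1) 0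
  then some (PySem.List.pyGetD pre (j + 1) 0 - PySem.List.pyGetD pre i 0, i, j)
  else none

def find_subarray_alt (arr : List Int) (k : Int) (m : Int) : List Int :=
  let n : Int := arr.length
  let pre := pyScan arr
  let neg := pyScan (arr.map (fun x => if x < 0 then (1 : Int) else 0))
  let pos := pyScan (arr.map (fun x => if 0 < x then (1 : Int) else 0))
  let cands := (PySem.List.pyRange 0 (n - m + 1) 1).flatMap (fun i =>
    (PySem.List.pyRange (max i (i + m - 1)) n 1).filterMap (candB pre neg pos k i))
  match PySem.List.max? cands (fun t => t.1) with
  | none => []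
  | some (_, bi, bj) => PySem.List.slice arr (some bi) (some (bj + 1))

-- ===== PRECONDITION & SPEC =====
def Spec_find_subarray (arr : List Int) (k : Int) (m : Int) (out : List Int) : Prop := out = find_subarray_alt arr k m
instance (arr : List Int) (k : Int) (m : Int) (out : List Int) : Decidable (Spec_find_subarray arr k m out) := by unfold Spec_find_subarray; infer_instance

-- ===== CLAIM (what is proved, stated in full; the proofs are below) =====
def Claim_equal_find_subarray : Prop := ∀ (arr : List Int) (k : Int) (m : Int), Dom_find_subarray arr k m → Spec_find_subarray arr k m (find_subarray arr k m)

-- ===== LEMMAS AND PROOFS =====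

-- A's static candidate for window (i, j): `some (sum, i, j)` iff A's test passes
def candA (arr : List Int) (k m i j : Int) : Option (Int × Int × Int) :=
  let seg := PySem.List.slice arr (some i) (some (j + 1))
  if (decide (m ≤ j - i + 1) && decide (seg.sum < k) &&
      (seg.any (fun x => decide (x < 0)) && seg.any (fun x => decide (0 < x)))) = true
  then some (seg.sum, i, j) else none

-- first-max selection step (= PySem.List.max?'s fold step for key = fst)
def pick (o : Option (Int × Int × Int)) (c : Int × Int × Int) : Option (Int × Int × Int) :=
  match o with
  | none => some c
  | some b => if b.1 < c.1 then some c else some b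

-- A's fold state as a function of the running best candidate
def absA (arr : List Int) : Option (Int × Int × Int) → Option Int × List Int × Bool
  | none => (none, [], false)
  | some c => (some c.1, PySem.List.slice arr (some c.2.1) (some (c.2.2 + 1)), true)

lemma stepA_absA (arr : List Int) (k m i j : Int) (o : Option (Int × Int × Int)) :
    stepA arr k m i (absA arr o) j =
      absA arr (match candA arr k m i j with | none => o | some c => pick o c) := by
  cases o with
  | none =>
    simp only [stepA, candA, absA, bestLtA, pick, Bool.and_true]
    split_ifs <;> simp_all
  | some b =>
    simp only [stepA, candA, absA, bestLtA, pick]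
    by_cases hb : b.1 < (PySem.List.slice arr (some i) (some (j + 1))).sum
    · simp only [decide_eq_true hb, Bool.and_true]
      split_ifs with h1
      · simp [hb]
      · rfl
    · simp only [decide_eq_false hb, Bool.and_false, Bool.false_and, Bool.false_eq_true,
        if_false]
      split_ifs with h2
      · simp [hb]
      · rfl

lemma foldl_stepA_absA (arr : List Int) (k m i : Int) (l : List Int) (o : Option (Int × Int × Int)) :
    l.foldl (stepA arr k m i) (absA arr o) =
      absA arr ((l.filterMap (candA arr k m i)).foldl pick o) := by
  induction l generalizing o with
  | nil => rfl
  | cons j t ih =>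
    simp only [List.foldl_cons, List.filterMap_cons]
    rw [stepA_absA]
    cases h : candA arr k m i j with
    | none => simpa [h] using ih o
    | some c => simpa [h] using ih (pick o c)

lemma foldl_pick_flatMap (l : List Int) (g : Int → List (Int × Int × Int))
    (o : Option (Int × Int × Int)) :
    l.foldl (fun o i => (g i).foldl pick o) o = (l.flatMap g).foldl pick o := by
  induction l generalizing o with
  | nil => rfl
  | cons a t ih => simp [List.flatMap_cons, List.foldl_append, ih]

lemma max?_pick (l : List (Int × Int × Int)) :
    PySem.List.max? l (fun t => t.1) = l.foldl pick none := by
  rw [PySem.List.max?]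
  congr 1
  funext o c
  cases o <;> rfl

lemma pyScan_aux (xs : List Int) : ∀ (acc : Int) (out : List Int),
    (xs.foldl (fun t v => (t.1 + v, t.2 ++ [t.1 + v])) (acc, out)).2 =
      out ++ (List.range xs.length).map (fun t => acc + (xs.take (t + 1)).sum) := by
  induction xs with
  | nil => simp
  | cons x t ih =>
    intro acc out
    simp only [List.foldl_cons, ih, List.length_cons, List.range_succ_eq_map,
      List.map_cons, List.map_map]
    simp [Function.comp, List.take_succ_cons, add_assoc]

lemma pyScan_eq (xs : List Int) :
    pyScan xs = (List.range (xs.length + 1)).map (fun t => ((xs.take t).sum : Int)) := by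
  rw [pyScan, pyScan_aux, List.range_succ_eq_map, List.map_cons, List.map_map]
  simp [Function.comp]

lemma pyScan_get (xs : List Int) (a : Int) (h0 : 0 ≤ a) (h1 : a ≤ (xs.length : Int)) :
    PySem.List.pyGetD (pyScan xs) a 0 = (xs.take a.toNat).sum := by
  rw [pyScan_eq]
  rw [PySem.List.pyGetD_eq_getElem _ _ h0 (by simp; omega)]
  simp

lemma take_split (arr : List Int) (i b : Int) (h0 : 0 ≤ i) (hib : i ≤ b) :
    arr.take b.toNat = arr.take i.toNat ++ PySem.List.slice arr (some i) (some b) := by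
  rw [PySem.List.slice_toNat arr h0 (le_trans h0 hib)]
  rw [show b.toNat = i.toNat + (b.toNat - i.toNat) by omega, List.take_add]
  congr 2
  omega

lemma slice_countP (arr : List Int) (i j : Int) (p : Int → Prop) [DecidablePred p]
    (h0 : 0 ≤ i) (hij : i ≤ j + 1) :
    (((arr.map (fun x => if p x then (1 : Int) else 0)).take i.toNat).sum <
      ((arr.map (fun x => if p x then (1 : Int) else 0)).take (j + 1).toNat).sum)
      ↔ (PySem.List.slice arr (some i) (some (j + 1))).any (fun x => decide (p x)) = true := by
  rw [← List.map_take, ← List.map_take, take_split arr i (j+1) h0 hij, List.map_append,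
    List.sum_append]
  have h1 : ∀ l : List Int, ((l.map (fun x => if p x then (1 : Int) else 0)).sum)
      = (l.countP (fun x => decide (p x)) : Int) := by
    intro l
    induction l with
    | nil => rfl
    | cons a t ih =>
      by_cases h : p a
      · simp [h, ih]
        ring
      · simp [h, ih]
  simp only [h1]
  constructor
  · intro h
    have : 0 < (PySem.List.slice arr (some i) (some (j+1))).countP (fun x => decide (p x)) := by
      by_contra hc
      omega
    rw [List.countP_pos_iff] at this
    simp only [List.any_eq_true]
    simpa using this
  · intro h
    simp only [List.any_eq_true] at h
    have : 0 < (PySem.List.slice arr (some i) (some (j+1))).countP (fun x => decide (p x)) :=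
      List.countP_pos_iff.2 (by simpa using h)
    omega

lemma candA_eq_candB (arr : List Int) (k m i j : Int) (h0 : 0 ≤ i) (hij : i ≤ j)
    (hm : m ≤ j - i + 1) (hj : j < (arr.length : Int)) :
    candA arr k m i j =
      candB (pyScan arr) (pyScan (arr.map (fun x => if x < 0 then (1 : Int) else 0)))
        (pyScan (arr.map (fun x => if 0 < x then (1 : Int) else 0))) k i j := by
  have hj1 : (0:Int) ≤ j + 1 := by omega
  have hlen : (j + 1 : Int) ≤ (arr.length : Int) := by omega
  have hmaplen : ∀ f : Int → Int, ((arr.map f).length : Int) = (arr.length : Int) := by simp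
  rw [candB, pyScan_get arr i h0 (by omega), pyScan_get arr (j+1) hj1 hlen,
    pyScan_get _ i h0 (by rw [hmaplen]; omega), pyScan_get _ (j+1) hj1 (by rw [hmaplen]; omega),
    pyScan_get _ i h0 (by rw [hmaplen]; omega), pyScan_get _ (j+1) hj1 (by rw [hmaplen]; omega)]
  have hsum : (arr.take (j+1).toNat).sum - (arr.take i.toNat).sum
      = (PySem.List.slice arr (some i) (some (j+1))).sum := by
    rw [take_split arr i (j+1) h0 (by omega), List.sum_append]; ring
  rw [hsum]
  have hneg := slice_countP arr i j (fun x => x < 0) h0 (by omega)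
  have hpos := slice_countP arr i j (fun x => 0 < x) h0 (by omega)
  rw [candA]
  simp only [decide_eq_true hm, Bool.true_and]
  by_cases h2 : (PySem.List.slice arr (some i) (some (j+1))).sum < k
  · simp only [decide_eq_true h2, Bool.true_and]
    by_cases h3 : (PySem.List.slice arr (some i) (some (j+1))).any (fun x => decide (x < 0)) = true
    · by_cases h4 : (PySem.List.slice arr (some i) (some (j+1))).any (fun x => decide (0 < x)) = true
      · rw [if_pos (by simp [h3, h4]), if_pos ⟨h2, hneg.2 h3, hpos.2 h4⟩]
      · rw [if_neg (by simp [h4]), if_neg (by intro hc; exact h4 (hpos.1 hc.2.2))]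
    · rw [if_neg (by simp [h3]), if_neg (by intro hc; exact h3 (hneg.1 hc.2.1))]
  · rw [if_neg (by simp [h2]), if_neg (by tauto)]

lemma filterMap_candA_eq (arr : List Int) (k m i : Int) (h0 : 0 ≤ i) :
    (PySem.List.pyRange i (arr.length : Int) 1).filterMap (candA arr k m i) =
      (PySem.List.pyRange (max i (i + m - 1)) (arr.length : Int) 1).filterMap
        (candB (pyScan arr) (pyScan (arr.map (fun x => if x < 0 then (1 : Int) else 0)))
          (pyScan (arr.map (fun x => if 0 < x then (1 : Int) else 0))) k i) := by
  set b := max i (i + m - 1) with hb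
  have hib : i ≤ b := le_max_left _ _
  have hshort : ∀ j : Int, j < i + m - 1 → candA arr k m i j = none := by
    intro j hj
    rw [candA]
    rw [if_neg]
    simp only [Bool.and_eq_true, decide_eq_true_eq]
    intro hc
    omega
  by_cases hbn : b ≤ (arr.length : Int)
  · rw [PySem.List.pyRange_one_append i b (arr.length : Int) hib hbn, List.filterMap_append]
    have h1 : (PySem.List.pyRange i b 1).filterMap (candA arr k m i) = [] := by
      rw [List.filterMap_eq_nil_iff]
      intro j hj
      rw [PySem.List.mem_pyRange_one] at hj
      exact hshort j (by omega)
    rw [h1, List.nil_append]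
    apply List.filterMap_congr
    intro j hj
    rw [PySem.List.mem_pyRange_one] at hj
    exact candA_eq_candB arr k m i j h0 (by omega) (by omega) (by omega)
  · rw [PySem.List.pyRange_one_eq_nil (by omega : (arr.length : Int) ≤ b)]
    simp only [List.filterMap_nil]
    rw [List.filterMap_eq_nil_iff]
    intro j hj
    rw [PySem.List.mem_pyRange_one] at hj
    exact hshort j (by omega)

lemma outerA (arr : List Int) (k m : Int) (l : List Int) (o : Option (Int × Int × Int)) :
    l.foldl (fun st i => (PySem.List.pyRange i (arr.length : Int) 1).foldl (stepA arr k m i) st)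
        (absA arr o)
      = absA arr (l.foldl (fun o i =>
          ((PySem.List.pyRange i (arr.length : Int) 1).filterMap (candA arr k m i)).foldl pick o) o) := by
  induction l generalizing o with
  | nil => rfl
  | cons a t ih =>
    simp only [List.foldl_cons]
    rw [foldl_stepA_absA]
    exact ih _

lemma find_subarray_eq (arr : List Int) (k m : Int) :
    find_subarray arr k m = find_subarray_alt arr k m := by
  unfold find_subarray find_subarray_alt
  simp only []
  rw [show ((none : Option Int), ([] : List Int), false) = absA arr none from rfl]
  rw [outerA arr k m]
  have hcong : (PySem.List.pyRange 0 ((arr.length : Int) - m + 1) 1).foldl (fun o i =>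
      ((PySem.List.pyRange i (arr.length : Int) 1).filterMap (candA arr k m i)).foldl pick o)
      (none : Option (Int × Int × Int))
    = (PySem.List.pyRange 0 ((arr.length : Int) - m + 1) 1).foldl (fun o i =>
      ((PySem.List.pyRange (max i (i + m - 1)) (arr.length : Int) 1).filterMap
        (candB (pyScan arr) (pyScan (arr.map (fun x => if x < 0 then (1 : Int) else 0)))
          (pyScan (arr.map (fun x => if 0 < x then (1 : Int) else 0))) k i)).foldl pick o)
      (none : Option (Int × Int × Int)) := by
    apply PySem.List.foldl_congr_mem
    intro o i hi
    rw [PySem.List.mem_pyRange_one] at hi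
    rw [filterMap_candA_eq arr k m i hi.1]
  rw [hcong]
  rw [foldl_pick_flatMap, ← max?_pick]
  cases h : PySem.List.max? ((PySem.List.pyRange 0 ((arr.length : Int) - m + 1) 1).flatMap (fun i =>
      (PySem.List.pyRange (max i (i + m - 1)) (arr.length : Int) 1).filterMap
        (candB (pyScan arr) (pyScan (arr.map (fun x => if x < 0 then (1 : Int) else 0)))
          (pyScan (arr.map (fun x => if 0 < x then (1 : Int) else 0))) k i))) (fun t => t.1) with
  | none => rfl
  | some c => rfl

-- ===== VERDICT (by name: the statement is the Claim_ definition above) =====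
theorem find_subarray_spec : Claim_equal_find_subarray := by
  intro arr k m _
  unfold Spec_find_subarray
  exact find_subarray_eq arr k m
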